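-- pv_equiv track=rewrite | github.com/sustainet-guardian/aletheia-probe | src/aletheia_probe/cli_logic/network.py | _is_allowed_host
-- ===== SOURCE A (Python) =====
-- def _is_allowed_host(host: str, allowed_hosts: set[str]) -> bool:
--     """Check whether a host is in the allowlist (exact or subdomain)."""
--     normalized = host.lower().strip()
--     if not normalized:
--         return False
--     return any(
--         normalized == allowed or normalized.endswith(f".{allowed}")
--         for allowed in allowed_hosts
--     )
-- ===== SOURCE B (Python) =====
-- def _is_allowed_host(host: str, allowed_hosts: set[str]) -> bool:
--     """Check whether a host is in the allowlist (exact or subdomain)."""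
--     normalized = host.lower().strip()
--     if not normalized:
--         return False
--     allowed = set(allowed_hosts)
--     if normalized in allowed:
--         return True
--     for i, ch in enumerate(normalized):
--         if ch == '.' and normalized[i + 1:] in allowed:
--             return True
--     return False
-- ===== Notes on version B (the rewrite author's own statement) =====
-- stated objective: alternative
-- what changed: Instead of scanning every allowlist entry and testing equality/endswith against the host, B builds a set from the allowlist and enumerates the host's dot-separated suffixes, checking each with a membership lookup; it trades the per-entry endswith scan for a set build plus one lookup per dot.
import Mathlib
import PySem

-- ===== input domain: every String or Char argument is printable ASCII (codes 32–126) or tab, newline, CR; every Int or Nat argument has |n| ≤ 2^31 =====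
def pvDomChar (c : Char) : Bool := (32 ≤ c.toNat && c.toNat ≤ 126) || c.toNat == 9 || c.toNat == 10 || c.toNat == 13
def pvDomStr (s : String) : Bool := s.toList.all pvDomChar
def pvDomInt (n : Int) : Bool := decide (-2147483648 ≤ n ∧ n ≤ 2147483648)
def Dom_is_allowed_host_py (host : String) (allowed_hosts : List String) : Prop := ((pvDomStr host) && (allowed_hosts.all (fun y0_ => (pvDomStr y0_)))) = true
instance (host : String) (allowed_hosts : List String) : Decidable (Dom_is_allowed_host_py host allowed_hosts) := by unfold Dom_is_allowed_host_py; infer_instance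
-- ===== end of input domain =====

-- B replaces A's per-entry equality/endswith scan of the allowlist by enumerating the
-- host's dot-suffixes and looking each up in a set built from the allowlist (objective: alternative).
-- ===== PORT A =====
def is_allowed_host_py (host : String) (allowed_hosts : List String) : Bool :=
  let normalized := PySem.Str.strip (PySem.Str.lower host)
  if normalized.toList = [] then false
  else allowed_hosts.any (fun allowed =>
    normalized == allowed || PySem.Str.endswith normalized (String.ofList ('.' :: allowed.toList)))

-- ===== PORT B =====
-- the 'for i, ch in enumerate(normalized): if ch == "." and normalized[i+1:] in allowed'
-- loop, as structural recursion (normalized[i+1:] is the tail after the current char)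
def pvDotLoop (allowed : PySem.Set String) : List Char → Bool
  | [] => false
  | c :: rest =>
      if c = '.' && PySem.Set.contains allowed (String.ofList rest) then true
      else pvDotLoop allowed rest

def is_allowed_host_py_alt (host : String) (allowed_hosts : List String) : Bool :=
  let normalized := PySem.Str.strip (PySem.Str.lower host)
  if normalized.toList = [] then false
  else
    let allowed := PySem.Set.ofList allowed_hosts
    if PySem.Set.contains allowed normalized then true
    else pvDotLoop allowed normalized.toList

-- ===== PRECONDITION & SPEC =====
def Spec_is_allowed_host_py (host : String) (allowed_hosts : List String) (out : Bool) : Prop := out = is_allowed_host_py_alt host allowed_hosts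
instance (host : String) (allowed_hosts : List String) (out : Bool) : Decidable (Spec_is_allowed_host_py host allowed_hosts out) := by unfold Spec_is_allowed_host_py; infer_instance

-- ===== CLAIM (what is proved, stated in full; the proofs are below) =====
def Claim_equal_is_allowed_host_py : Prop := ∀ (host : String) (allowed_hosts : List String), Dom_is_allowed_host_py host allowed_hosts → Spec_is_allowed_host_py host allowed_hosts (is_allowed_host_py host allowed_hosts)

-- ===== LEMMAS AND PROOFS =====
-- the dot-loop hits exactly the strings that follow a '.' as a suffix of cs
theorem pvDotLoop_eq_true_iff (allowed : PySem.Set String) (cs : List Char) :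
    pvDotLoop allowed cs = true ↔ ∃ suf, ('.' :: suf) <:+ cs ∧ String.ofList suf ∈ allowed := by
  induction cs with
  | nil =>
      simp only [pvDotLoop]
      constructor
      · intro h; cases h
      · rintro ⟨suf, h, -⟩
        exact absurd (List.eq_nil_of_suffix_nil h) (by simp)
  | cons c rest ih =>
      simp only [pvDotLoop]
      split_ifs with h
      · simp only [true_iff]
        refine ⟨rest, ?_, ?_⟩
        · simp only [Bool.and_eq_true, decide_eq_true_eq] at h
          rw [h.1]
        · simp only [Bool.and_eq_true] at h
          exact (PySem.Set.contains_iff _ _).mp h.2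
      · rw [ih]
        constructor
        · rintro ⟨suf, hs, hm⟩
          exact ⟨suf, hs.trans (List.suffix_cons c rest), hm⟩
        · rintro ⟨suf, hs, hm⟩
          rcases List.suffix_cons_iff.mp hs with heq | hs'
          · exfalso
            have hc : c = '.' ∧ suf = rest := by
              have := heq; injection this with h1 h2; exact ⟨h1.symm, h2⟩
            apply h
            simp only [Bool.and_eq_true, decide_eq_true_eq]
            exact ⟨hc.1, (PySem.Set.contains_iff _ _).mpr (hc.2 ▸ hm)⟩
          · exact ⟨suf, hs', hm⟩

theorem main_eq (host : String) (allowed_hosts : List String) :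
    is_allowed_host_py host allowed_hosts = is_allowed_host_py_alt host allowed_hosts := by
  unfold is_allowed_host_py is_allowed_host_py_alt
  set normalized := PySem.Str.strip (PySem.Str.lower host) with hn
  by_cases hnil : normalized.toList = []
  · simp [hnil]
  · simp only [if_neg hnil]
    rw [Bool.eq_iff_iff]
    simp only [List.any_eq_true, Bool.or_eq_true, beq_iff_eq]
    constructor
    · rintro ⟨a, ha, hcase⟩
      rcases hcase with heq | hend
      · rw [if_pos]
        rw [PySem.Set.contains_iff, heq, PySem.Set.mem_ofList]
        exact ha
      · -- endswith case
        have hsuf : ('.' :: a.toList) <:+ normalized.toList := by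
          rw [PySem.Str.endswith_eq] at hend
          have h2 := (PySem.Chars.endswith_iff _ _).mp hend
          simpa using h2
        have hloop : pvDotLoop (PySem.Set.ofList allowed_hosts) normalized.toList = true :=
          (pvDotLoop_eq_true_iff _ _).mpr
            ⟨a.toList, hsuf, by
              rw [PySem.Set.mem_ofList, String.ofList_toList]; exact ha⟩
        split_ifs with hc
        · rfl
        · exact hloop
    · intro h
      split_ifs at h with hc
      · -- exact membership
        rw [PySem.Set.contains_iff, PySem.Set.mem_ofList] at hc
        exact ⟨normalized, hc, Or.inl rfl⟩
      · rcases (pvDotLoop_eq_true_iff _ _).mp h with ⟨suf, hs, hm⟩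
        rw [PySem.Set.mem_ofList] at hm
        refine ⟨String.ofList suf, hm, Or.inr ?_⟩
        rw [PySem.Str.endswith_eq]
        apply (PySem.Chars.endswith_iff _ _).mpr
        simp only [String.toList_ofList]
        exact hs

-- ===== VERDICT (by name: the statement is the Claim_ definition above) =====
theorem is_allowed_host_py_spec : Claim_equal_is_allowed_host_py := by
  intro host allowed_hosts _
  unfold Spec_is_allowed_host_py
  rw [main_eq]
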